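-- pv_equiv track=rewrite | github.com/akikuno/DAJIN2 | src/DAJIN2/core/preprocess/get_index_mapping.py | calculate_index_mapping
-- ===== SOURCE A (Python) =====
-- def calculate_index_mapping(cssplits: list[str]) -> dict[int, int]:
--     index_mapping = dict()
--     query_index = 0
--     range_inversion = set()
--     for reference_index, element in enumerate(cssplits):
--         # Inversion: If the last character is lower, it means we're in an inverted range
--         if reference_index in range_inversion:
--             continue
--         if element[-1].islower():
--             start = reference_index
--             while element[-1].islower() and reference_index < len(cssplits):
--                 end = reference_index
--                 range_inversion.add(reference_index)
--                 reference_index += 1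
--                 query_index += 1
--                 element = cssplits[reference_index]
--             query_indexes = {i: j for i, j in zip(range(start, end + 1), range(end, start - 1, -1))}
--             index_mapping.update(query_indexes)
--         # Deletion or Unknown: Skip incrementing query_index
--         elif element.startswith("-") or element == "N":
--             continue
--         # Substition: Just incrementing query_index
--         elif element.startswith("*"):
--             query_index += 1
--         # Insertion: incrementing query_index by the number of insertions
--         elif element.startswith("+"):
--             query_index += element.count("+")
--             index_mapping[reference_index] = query_index
--             query_index += 1
--         else:
--             index_mapping[reference_index] = query_index
--             query_index += 1
--     return index_mapping
-- ===== SOURCE B (Python) =====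
-- def calculate_index_mapping(cssplits: list[str]) -> dict[int, int]:
--     n = len(cssplits)
--     low = [e[-1].islower() for e in cssplits]
--     # query index available before each position (prefix sums of per-element consumption)
--     qbefore = []
--     q = 0
--     for e, lo in zip(cssplits, low):
--         qbefore.append(q)
--         if lo:
--             q += 1
--         elif e.startswith("-") or e == "N":
--             pass
--         elif e.startswith("+"):
--             q += e.count("+") + 1
--         else:
--             q += 1
--     # run-start of the inversion run containing i (forward pass)
--     start = [0] * n
--     for i in range(n):
--         start[i] = start[i - 1] if i > 0 and low[i] and low[i - 1] else i
--     # run-end of the inversion run containing i (backward pass)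
--     end = [0] * n
--     for i in range(n - 1, -1, -1):
--         end[i] = end[i + 1] if i + 1 < n and low[i] and low[i + 1] else i
--     # one mapping pass with closed-form values
--     mapping = {}
--     for i, e in enumerate(cssplits):
--         if low[i]:
--             mapping[i] = start[i] + end[i] - i
--         elif e.startswith("-") or e == "N" or e.startswith("*"):
--             continue
--         elif e.startswith("+"):
--             mapping[i] = qbefore[i] + e.count("+")
--         else:
--             mapping[i] = qbefore[i]
--     return mapping
-- ===== Notes on version B (the rewrite author's own statement) =====
-- stated objective: alternative
-- what changed: Replaces A's single stateful pass (mutable query_index, inner while over runs, skip-set) by staged array passes: a prefix-sum pass for query indices, a forward run-start pass, a backward run-end pass, then one mapping pass whose values are closed-form expressions in those arrays.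
import Mathlib
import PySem

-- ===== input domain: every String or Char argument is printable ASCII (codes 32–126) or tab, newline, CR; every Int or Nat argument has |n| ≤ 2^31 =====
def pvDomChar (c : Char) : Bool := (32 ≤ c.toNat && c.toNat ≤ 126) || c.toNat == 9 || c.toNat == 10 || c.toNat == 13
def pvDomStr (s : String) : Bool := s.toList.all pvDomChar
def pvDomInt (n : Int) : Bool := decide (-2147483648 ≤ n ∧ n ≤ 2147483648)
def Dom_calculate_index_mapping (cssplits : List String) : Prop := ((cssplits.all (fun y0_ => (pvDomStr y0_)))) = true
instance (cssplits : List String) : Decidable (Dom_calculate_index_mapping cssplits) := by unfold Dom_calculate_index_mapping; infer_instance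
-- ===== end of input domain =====

-- B replaces A's single stateful pass (query_index counter, inner while, skip-set) by staged
-- array passes — prefix sums, run-start, run-end, then one closed-form mapping pass
-- (objective: alternative; same O(n) cost).


-- ===== PORT A =====
-- element[-1].islower()  (false on "" is unreachable under Pre_: Python raises IndexError there)
def pvLastLower (s : String) : Bool :=
  match PySem.Str.pyGet? s (-1) with
  | some c => PySem.Chars.islower c
  | none => false

-- A's inner while loop: `while element[-1].islower() and reference_index < len(cssplits): ...`.
-- On `cssplits[reference_index]` past the end Python raises IndexError (outside Pre_); we return the current state.
def pvInnerA (cs : List String) (elem : String) (ri e qi : Int) (inv : PySem.Set Int) : Nat → Int × Int × PySem.Set Int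
  | 0 => (e, qi, inv)
  | fuel+1 =>
    if pvLastLower elem && decide (ri < (cs.length : Int)) then
      let e' := ri
      let inv' := inv.add ri
      let ri' := ri + 1
      let qi' := qi + 1
      match PySem.List.pyGet? cs ri' with
      | some elem' => pvInnerA cs elem' ri' e' qi' inv' fuel
      | none => (e', qi', inv')
    else (e, qi, inv)

-- one iteration of A's `for reference_index, element in enumerate(cssplits)` body
def pvStepA (cs : List String) (st : PySem.Dict Int Int × Int × PySem.Set Int) (p : Int × String) :
    PySem.Dict Int Int × Int × PySem.Set Int :=
  let m := st.1
  let qi := st.2.1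
  let inv := st.2.2
  let ri := p.1
  let elem := p.2
  if inv.contains ri then st
  else if pvLastLower elem then
    let r := pvInnerA cs elem ri ri qi inv (cs.length + 1)
    let e := r.1
    let qpairs := (PySem.List.pyRange ri (e+1) 1).zip (PySem.List.pyRange e (ri-1) (-1))
    (qpairs.foldl (fun m p => m.insert p.1 p.2) m, r.2.1, r.2.2)
  else if PySem.Str.startswith elem "-" || elem == "N" then st
  else if PySem.Str.startswith elem "*" then (m, qi + 1, inv)
  else if PySem.Str.startswith elem "+" then
    let qi2 := qi + (PySem.Str.count elem "+" : Int)
    (m.insert ri qi2, qi2 + 1, inv)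
  else (m.insert ri qi, qi + 1, inv)

def calculate_index_mapping (cssplits : List String) : List (Int × Int) :=
  ((PySem.List.enumerate cssplits 0).foldl (pvStepA cssplits)
    (PySem.Dict.empty, 0, PySem.Set.empty)).1.items

-- ===== PORT B =====
-- low = [e[-1].islower() for e in cssplits]
def pvLowList (cs : List String) : List Bool := cs.map pvLastLower

-- body of B's qbefore loop: append q, then update q by the branch on (element, lo)
def pvQNext (q : Int) (p : String × Bool) : Int :=
  if p.2 then q + 1
  else if PySem.Str.startswith p.1 "-" || p.1 == "N" then q
  else if PySem.Str.startswith p.1 "+" then q + ((PySem.Str.count p.1 "+" : Int) + 1)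
  else q + 1

def pvQStep (st : List Int × Int) (p : String × Bool) : List Int × Int :=
  (st.1 ++ [st.2], pvQNext st.2 p)

def pvQBefore (cs : List String) : List Int :=
  ((cs.zip (pvLowList cs)).foldl pvQStep ([], 0)).1

-- forward pass: start[i] = start[i-1] if i > 0 and low[i] and low[i-1] else i
def pvStartStep (low : List Bool) (acc : List Int) (i : Nat) : List Int :=
  acc ++ [if 0 < i ∧ low.getD i false = true ∧ low.getD (i-1) false = true
          then acc.getD (i-1) 0 else (i : Int)]

def pvStartList (low : List Bool) : List Int :=
  (List.range low.length).foldl (pvStartStep low) []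

-- backward pass, suffix by suffix: end[i] = end[i+1] if i+1 < n and low[i] and low[i+1] else i
def pvEndFrom : List Bool → Nat → List Int
  | [], _ => []
  | b :: rest, i =>
    let tl := pvEndFrom rest (i+1)
    (if b && rest.headD false then tl.headD 0 else (i : Int)) :: tl

-- one iteration of B's final mapping loop
def pvStepB (low : List Bool) (qb st en : List Int) (m : PySem.Dict Int Int) (p : Int × String) :
    PySem.Dict Int Int :=
  let i := p.1
  let e := p.2
  if PySem.List.pyGetD low i false then
    m.insert i (PySem.List.pyGetD st i 0 + PySem.List.pyGetD en i 0 - i)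
  else if PySem.Str.startswith e "-" || e == "N" || PySem.Str.startswith e "*" then m
  else if PySem.Str.startswith e "+" then
    m.insert i (PySem.List.pyGetD qb i 0 + (PySem.Str.count e "+" : Int))
  else m.insert i (PySem.List.pyGetD qb i 0)

def calculate_index_mapping_alt (cssplits : List String) : List (Int × Int) :=
  ((PySem.List.enumerate cssplits 0).foldl
    (pvStepB (pvLowList cssplits) (pvQBefore cssplits)
      (pvStartList (pvLowList cssplits)) (pvEndFrom (pvLowList cssplits) 0))
    PySem.Dict.empty).items

-- ===== PRECONDITION & SPEC =====
-- Pre_ excludes exactly the inputs where Python A raises IndexError: an empty-string element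
-- (element[-1]) or a last element ending in a lowercase letter (the inner while then reads
-- cssplits[len(cssplits)]).
def Pre_calculate_index_mapping (cssplits : List String) : Prop :=
  (∀ s ∈ cssplits, s ≠ "") ∧ cssplits.getLast?.all (fun s => !pvLastLower s) = true
instance (cssplits : List String) : Decidable (Pre_calculate_index_mapping cssplits) := by
  unfold Pre_calculate_index_mapping; infer_instance

def pvWitness_calculate_index_mapping : List String := ["=A", "-a", "*ag", "=C", "N", "+G|+G|=T", "*AG"]

def Spec_calculate_index_mapping (cssplits : List String) (out : List (Int × Int)) : Prop :=
  out = calculate_index_mapping_alt cssplits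
instance (cssplits : List String) (out : List (Int × Int)) : Decidable (Spec_calculate_index_mapping cssplits out) := by
  unfold Spec_calculate_index_mapping; infer_instance

-- ===== CLAIM (what is proved, stated in full; the proofs are below) =====
def Claim_equal_calculate_index_mapping : Prop := ∀ (cssplits : List String), Dom_calculate_index_mapping cssplits → Pre_calculate_index_mapping cssplits → Spec_calculate_index_mapping cssplits (calculate_index_mapping cssplits)


-- ===== LEMMAS AND PROOFS =====

-- ---------- A-side machinery (run lengths, inner-loop characterisation, skip lemma) ----------

-- length of the inversion run starting at index i
def pvRun (cs : List String) (i : Nat) : Nat := ((cs.drop i).takeWhile pvLastLower).length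

-- A's fold restarted from reference index i
def pvFA (cs : List String) (i : Nat) (st : PySem.Dict Int Int × Int × PySem.Set Int) :
    PySem.Dict Int Int × Int × PySem.Set Int :=
  (PySem.List.enumerate (cs.drop i) (i : Int)).foldl (pvStepA cs) st

lemma pvRun_big (cs : List String) (i : Nat) (h : cs.length ≤ i) : pvRun cs i = 0 := by
  simp [pvRun, List.drop_eq_nil_of_le h]

lemma pvRun_stop (cs : List String) (i : Nat) (h : i < cs.length) (hl : pvLastLower cs[i] = false) :
    pvRun cs i = 0 := by
  rw [pvRun, List.drop_eq_getElem_cons h, List.takeWhile_cons, hl]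
  simp

lemma pvRun_step (cs : List String) (i : Nat) (h : i < cs.length) (hl : pvLastLower cs[i] = true) :
    pvRun cs i = pvRun cs (i+1) + 1 := by
  rw [pvRun, List.drop_eq_getElem_cons h, List.takeWhile_cons, hl]
  simp [pvRun, Nat.add_comm]

lemma pvRun_le (cs : List String) (i : Nat) (hi : i ≤ cs.length) : i + pvRun cs i ≤ cs.length := by
  have h1 : pvRun cs i ≤ (cs.drop i).length :=
    (List.takeWhile_prefix (p := pvLastLower) (l := cs.drop i)).length_le
  have h2 : (cs.drop i).length = cs.length - i := List.length_drop ..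
  omega

lemma pvRun_lt (cs : List String) (h2 : cs.getLast?.all (fun s => !pvLastLower s) = true) :
    ∀ (K i : Nat), cs.length ≤ i + K → i < cs.length → i + pvRun cs i < cs.length := by
  intro K
  induction K with
  | zero => intro i hK hi; omega
  | succ K ih =>
    intro i hK hi
    by_cases hl : pvLastLower cs[i] = true
    · rcases Nat.lt_or_ge (i+1) cs.length with h1 | h1
      · have := ih (i+1) (by omega) h1
        rw [pvRun_step cs i hi hl]
        omega
      · exfalso
        have hlast : cs.getLast? = some cs[i] := by
          rw [List.getLast?_eq_getElem?]
          have : cs.length - 1 = i := by omega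
          rw [this, List.getElem?_eq_getElem hi]
        rw [hlast] at h2
        simp [hl] at h2
    · rw [pvRun_stop cs i hi (by simpa using hl)]
      omega

lemma pvRun_pos_low (cs : List String) (i : Nat) (h : 0 < pvRun cs i) :
    ∃ hi : i < cs.length, pvLastLower cs[i] = true := by
  have hi : i < cs.length := by
    by_contra hge
    rw [pvRun_big cs i (by omega)] at h
    omega
  refine ⟨hi, ?_⟩
  by_contra hF
  rw [pvRun_stop cs i hi (by simpa using hF)] at h
  omega

lemma pvRun_inside (cs : List String) : ∀ (t i : Nat), t < pvRun cs i →
    pvRun cs (i + t) = pvRun cs i - t := by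
  intro t
  induction t with
  | zero => intro i _; simp
  | succ t ih =>
    intro i h
    obtain ⟨hi, hl⟩ := pvRun_pos_low cs i (by omega)
    rw [pvRun_step cs i hi hl] at h ⊢
    rw [show i + (t+1) = (i+1) + t by omega, ih (i+1) (by omega)]
    omega

lemma pvInnerA_eq (cs : List String) (h2 : cs.getLast?.all (fun s => !pvLastLower s) = true) :
    ∀ (f : Nat) (i : Nat) (qi e0 : Int) (inv : PySem.Set Int) (hi : i < cs.length),
      pvLastLower cs[i] = true → pvRun cs i ≤ f →
      ∃ inv', pvInnerA cs cs[i] (i : Int) e0 qi inv f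
          = (((i + pvRun cs i - 1 : Nat) : Int), qi + (pvRun cs i : Int), inv')
        ∧ ∀ x, x ∈ inv' ↔ x ∈ inv ∨ ∃ k, k < pvRun cs i ∧ x = ((i + k : Nat) : Int) := by
  intro f
  induction f with
  | zero =>
    intro i qi e0 inv hi hl hf
    rw [pvRun_step cs i hi hl] at hf
    omega
  | succ f ih =>
    intro i qi e0 inv hi hl hf
    have hrun1 : 1 ≤ pvRun cs i := by rw [pvRun_step cs i hi hl]; omega
    have hlt : i + pvRun cs i < cs.length := pvRun_lt cs h2 cs.length i (by omega) hi
    have hi1 : i + 1 < cs.length := by omega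
    rw [pvInnerA]
    simp only [hl, decide_eq_true (by exact_mod_cast hi : (i:Int) < (cs.length:Int)),
      Bool.true_and, if_true]
    have hcast : ((i:Int) + 1) = ((i+1 : Nat) : Int) := by push_cast; ring
    rw [hcast, PySem.List.pyGet?_natCast, List.getElem?_eq_getElem hi1]
    dsimp only
    by_cases hl1 : pvLastLower cs[i+1] = true
    · obtain ⟨inv', heq, hmem⟩ := ih (i+1) (qi+1) (i:Int) (inv.add (i:Int)) hi1 hl1
        (by rw [pvRun_step cs i hi hl] at hf; omega)
      refine ⟨inv', ?_, ?_⟩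
      · rw [heq, pvRun_step cs i hi hl]
        simp only [Prod.mk.injEq]
        exact ⟨Nat.cast_inj.mpr (by omega), by push_cast; ring, trivial⟩
      · intro x
        rw [hmem x, PySem.Set.mem_add, pvRun_step cs i hi hl]
        constructor
        · rintro ((hx | hx) | ⟨k, hk, hx⟩)
          · exact Or.inl hx
          · exact Or.inr ⟨0, by omega, by simpa using hx⟩
          · exact Or.inr ⟨k+1, by omega, by rw [hx]; congr 1; omega⟩
        · rintro (hx | ⟨k, hk, hx⟩)
          · exact Or.inl (Or.inl hx)
          · rcases Nat.eq_zero_or_pos k with rfl | hk0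
            · exact Or.inl (Or.inr (by simpa using hx))
            · exact Or.inr ⟨k-1, by omega, by rw [hx]; congr 1; omega⟩
    · have hr1 : pvRun cs i = 1 := by
        rw [pvRun_step cs i hi hl, pvRun_stop cs (i+1) hi1 (by simpa using hl1)]
      have hstop : pvInnerA cs cs[i+1] ((i+1 : Nat) : Int) (i:Int) (qi+1) (inv.add (i:Int)) f
          = ((i:Int), qi+1, inv.add (i:Int)) := by
        cases f with
        | zero => rfl
        | succ f =>
          rw [pvInnerA]
          rw [Bool.not_eq_true] at hl1
          simp [hl1]
      refine ⟨inv.add (i:Int), ?_, ?_⟩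
      · rw [hstop, hr1]
        simp
      · intro x
        rw [PySem.Set.mem_add, hr1]
        constructor
        · rintro (hx | hx)
          · exact Or.inl hx
          · exact Or.inr ⟨0, by omega, by simpa using hx⟩
        · rintro (hx | ⟨k, hk, hx⟩)
          · exact Or.inl hx
          · have : k = 0 := by omega
            subst this
            exact Or.inr (by simpa using hx)

lemma pvZipRanges (s e : Int) :
    (PySem.List.pyRange s (e + 1) 1).zip (PySem.List.pyRange e (s - 1) (-1))
      = (PySem.List.pyRange s (e + 1) 1).map (fun k => (k, e - (k - s))) := by
  rw [PySem.List.pyRange_one, PySem.List.pyRange_neg_one,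
    show e - (s - 1) = e + 1 - s by ring, List.zip_map', List.map_map]
  apply List.map_congr_left
  intro k _
  simp only [Function.comp_apply, Prod.mk.injEq, true_and]
  ring

lemma pvEnumCons (cs : List String) (i : Nat) (h : i < cs.length) :
    PySem.List.enumerate (cs.drop i) (i : Int)
      = ((i : Int), cs[i]) :: PySem.List.enumerate (cs.drop (i+1)) ((i : Int) + 1) := by
  rw [List.drop_eq_getElem_cons h]
  simp [PySem.List.enumerate]

lemma pvSkip (cs : List String) (e : Nat) (he : e < cs.length) :
    ∀ (d j : Nat) (st : PySem.Dict Int Int × Int × PySem.Set Int), j + d = e + 1 →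
      (∀ k : Nat, j ≤ k → k ≤ e → st.2.2.contains ((k : Nat) : Int) = true) →
      pvFA cs j st = pvFA cs (e+1) st := by
  intro d
  induction d with
  | zero => intro j st hj _; rw [show j = e + 1 by omega]
  | succ d ih =>
    intro j st hj hmem
    have hjn : j < cs.length := by omega
    have hstep : pvStepA cs st ((j : Int), cs[j]) = st := by
      have hc : ((j : Nat) : Int) ∈ st.2.2 := by
        have := hmem j (by omega) (by omega)
        simpa [PySem.Set.contains, List.contains_iff_mem] using this
      rw [pvStepA]
      simp [PySem.Set.contains, hc]
    rw [pvFA, pvEnumCons cs j hjn]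
    rw [List.foldl_cons, hstep]
    have : ((j:Int) + 1) = ((j+1 : Nat) : Int) := by push_cast; ring
    rw [this]
    exact ih (j+1) st (by omega) (fun k hk1 hk2 => hmem k (by omega) hk2)

-- ---------- B-side machinery: characterising the staged arrays ----------

-- B's fold restarted at index i
def pvFB (cs : List String) (i : Nat) (m : PySem.Dict Int Int) : PySem.Dict Int Int :=
  (PySem.List.enumerate (cs.drop i) ((i : Nat) : Int)).foldl
    (pvStepB (pvLowList cs) (pvQBefore cs) (pvStartList (pvLowList cs)) (pvEndFrom (pvLowList cs) 0)) m

lemma pvGetDs (cs : List String) (j : Nat) (h : j < cs.length) : cs.getD j "" = cs[j] := by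
  simp [List.getD, List.getElem?_eq_getElem h]

lemma pvLow_getD (cs : List String) (k : Nat) :
    (pvLowList cs).getD k false = pvLastLower (cs.getD k "") := by
  rcases Nat.lt_or_ge k cs.length with h | h
  · simp [pvLowList, List.getD, List.getElem?_map, List.getElem?_eq_getElem h]
  · have h1 : (pvLowList cs)[k]? = none := by
      rw [List.getElem?_eq_none]
      simpa [pvLowList] using h
    have h2 : cs[k]? = none := List.getElem?_eq_none h
    simp [List.getD, h1, h2]
    decide

lemma pvLow_getD_lt (cs : List String) (j : Nat) (h : j < cs.length) :
    (pvLowList cs).getD j false = pvLastLower cs[j] := by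
  rw [pvLow_getD, pvGetDs cs j h]

-- prefix sums of per-element query consumption
def pvPartial : List (String × Bool) → Nat → Int
  | _, 0 => 0
  | [], _+1 => 0
  | p :: tl, k+1 => pvQNext 0 p + pvPartial tl k

def pvQ (cs : List String) (k : Nat) : Int := pvPartial (cs.zip (pvLowList cs)) k

def pvQGen : List (String × Bool) → Int → List Int
  | [], _ => []
  | p :: tl, q => q :: pvQGen tl (pvQNext q p)

lemma pvQNext_shift (q : Int) (p : String × Bool) : pvQNext q p = q + pvQNext 0 p := by
  unfold pvQNext
  split_ifs <;> ring

lemma pvFoldQ (l : List (String × Bool)) : ∀ (acc : List Int) (q : Int),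
    (l.foldl pvQStep (acc, q)).1 = acc ++ pvQGen l q := by
  induction l with
  | nil => intro acc q; simp [pvQGen]
  | cons p tl ih =>
    intro acc q
    rw [List.foldl_cons, show pvQStep (acc, q) p = (acc ++ [q], pvQNext q p) from rfl, ih]
    simp [pvQGen]

lemma pvQGen_getD (l : List (String × Bool)) : ∀ (q : Int) (k : Nat), k < l.length →
    (pvQGen l q).getD k 0 = q + pvPartial l k := by
  induction l with
  | nil => intro q k h; simp at h
  | cons p tl ih =>
    intro q k h
    cases k with
    | zero => simp [pvQGen, pvPartial]
    | succ k =>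
      have hrec := ih (pvQNext q p) k (by simpa using h)
      rw [show pvQGen (p :: tl) q = q :: pvQGen tl (pvQNext q p) from rfl,
        List.getD_cons_succ, hrec, pvQNext_shift q p,
        show pvPartial (p :: tl) (k+1) = pvQNext 0 p + pvPartial tl k from rfl]
      ring

lemma pvQB_getD (cs : List String) (k : Nat) (h : k < cs.length) :
    (pvQBefore cs).getD k 0 = pvQ cs k := by
  unfold pvQBefore pvQ
  rw [pvFoldQ]
  have hlen : k < (cs.zip (pvLowList cs)).length := by
    simpa [pvLowList] using h
  rw [List.nil_append, pvQGen_getD _ 0 k hlen]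
  ring

lemma pvPartial_succ (l : List (String × Bool)) : ∀ (k : Nat) (h : k < l.length),
    pvPartial l (k+1) = pvPartial l k + pvQNext 0 l[k] := by
  induction l with
  | nil => intro k h; simp at h
  | cons p tl ih =>
    intro k h
    cases k with
    | zero => simp [pvPartial]
    | succ k =>
      simp only [pvPartial, List.getElem_cons_succ, ih k (by simpa using h)]
      ring

lemma pvQ_succ (cs : List String) (k : Nat) (h : k < cs.length) :
    pvQ cs (k+1) = pvQ cs k + pvQNext 0 (cs[k], pvLastLower cs[k]) := by
  unfold pvQ
  have hz : k < (cs.zip (pvLowList cs)).length := by simpa [pvLowList] using h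
  rw [pvPartial_succ _ k hz]
  congr 2
  rw [List.getElem_zip]
  simp [pvLowList]

lemma pvQ_run (cs : List String) (i : Nat) :
    ∀ t, t ≤ pvRun cs i → pvQ cs (i + t) = pvQ cs i + (t : Int) := by
  intro t
  induction t with
  | zero => simp
  | succ t ih =>
    intro h
    have hrun : pvRun cs (i+t) = pvRun cs i - t := pvRun_inside cs t i (by omega)
    obtain ⟨hlt, hl⟩ := pvRun_pos_low cs (i+t) (by omega)
    rw [show i + (t+1) = (i+t)+1 by omega, pvQ_succ cs (i+t) hlt, ih (by omega), hl]
    simp [pvQNext]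
    push_cast
    ring

-- the start array holds pvStartVal
def pvStartVal (low : List Bool) : Nat → Int
  | 0 => 0
  | k+1 => if low.getD (k+1) false = true ∧ low.getD k false = true
           then pvStartVal low k else ((k+1 : Nat) : Int)

lemma pvStartFold (low : List Bool) : ∀ (j : Nat),
    ((List.range j).foldl (pvStartStep low) []).length = j ∧
    ∀ k, k < j → ((List.range j).foldl (pvStartStep low) []).getD k 0 = pvStartVal low k := by
  intro j
  induction j with
  | zero => simp
  | succ j ih =>
    obtain ⟨hlen, hent⟩ := ih
    rw [List.range_succ, List.foldl_append, List.foldl_cons, List.foldl_nil]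
    constructor
    · simp [pvStartStep, hlen]
    · intro k hk
      rcases Nat.lt_or_ge k j with hkj | hkj
      · rw [pvStartStep, List.getD_append _ _ _ _ (by omega)]
        exact hent k hkj
      · have hkj' : k = j := by omega
        subst hkj'
        rw [pvStartStep, List.getD_append_right _ _ _ _ (by omega), hlen, Nat.sub_self,
          List.getD_cons_zero]
        cases k with
        | zero => simp [pvStartVal]
        | succ t =>
          rw [pvStartVal]
          by_cases hcond : low.getD (t+1) false = true ∧ low.getD t false = true
          · rw [if_pos ⟨by omega, hcond.1, hcond.2⟩, if_pos hcond]
            simp only [Nat.add_sub_cancel]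
            exact hent t (by omega)
          · rw [if_neg (by tauto), if_neg hcond]

lemma pvStart_getD (low : List Bool) (k : Nat) (h : k < low.length) :
    (pvStartList low).getD k 0 = pvStartVal low k :=
  (pvStartFold low low.length).2 k h

lemma pvStart_run (low : List Bool) (s : Nat) (hs : s = 0 ∨ low.getD (s-1) false = false) :
    ∀ (d : Nat), (∀ j, s ≤ j → j ≤ s + d → low.getD j false = true) →
      pvStartVal low (s + d) = ((s : Nat) : Int) := by
  intro d
  induction d with
  | zero =>
    intro _
    cases hsz : s with
    | zero => simp [pvStartVal]
    | succ t =>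
      subst hsz
      show pvStartVal low (t+1) = _
      rw [pvStartVal]
      rcases hs with h0 | hF
      · omega
      · rw [if_neg]
        intro hcond
        rw [show t + 1 - 1 = t by omega] at hF
        rw [hF] at hcond
        exact absurd hcond.2 (by simp)
  | succ d ih =>
    intro hlow
    have h1 : low.getD (s+d+1) false = true := hlow _ (by omega) (by omega)
    have h2 : low.getD (s+d) false = true := hlow _ (by omega) (by omega)
    show pvStartVal low ((s+d)+1) = _
    rw [pvStartVal, if_pos ⟨h1, h2⟩]
    exact ih (fun j hj1 hj2 => hlow j hj1 (by omega))

-- the end array holds pvEndVal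
def pvRunB (l : List Bool) : Nat := (l.takeWhile id).length

def pvEndVal (low : List Bool) (i k : Nat) : Int :=
  if low.getD k false = true then ((i + k + pvRunB (low.drop k) - 1 : Nat) : Int)
  else ((i + k : Nat) : Int)

lemma pvEnd_getD : ∀ (low : List Bool) (i k : Nat), k < low.length →
    (pvEndFrom low i).getD k 0 = pvEndVal low i k := by
  intro low
  induction low with
  | nil => intro i k h; simp at h
  | cons b rest ih =>
    intro i k h
    cases k with
    | zero =>
      rw [pvEndFrom]
      cases b with
      | false => simp [pvEndVal, pvRunB]
      | true =>
        cases rest with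
        | nil => simp [pvEndVal, pvRunB]
        | cons b2 rest2 =>
          cases b2 with
          | false => simp [pvEndVal, pvRunB]
          | true =>
            have htl := ih (i+1) 0 (by simp)
            have hrb : pvRunB (true :: true :: rest2) = pvRunB (true :: rest2) + 1 := by
              simp [pvRunB, List.takeWhile_cons]
            have hrb1 : 1 ≤ pvRunB (true :: rest2) := by
              simp [pvRunB, List.takeWhile_cons]
            have hltl : (pvEndFrom (true :: rest2) (i+1)).getD 0 0
                = ((i + 1 + pvRunB (true :: rest2) - 1 : Nat) : Int) := by
              rw [htl, pvEndVal, if_pos (by simp)]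
              simp only [List.drop_zero]
            simp only [List.getD_cons_zero]
            rw [show ((true : Bool) && (true :: rest2).headD false) = true from rfl]
            simp only [if_true]
            rw [show ∀ (l : List Int), l.headD 0 = l.getD 0 0 from fun l => by cases l <;> simp]
            rw [hltl, pvEndVal, if_pos (by simp)]
            simp only [List.drop_zero]
            rw [hrb]
            congr 1
            omega
    | succ k =>
      rw [pvEndFrom]
      simp only [List.getD_cons_succ]
      rw [ih (i+1) k (by simpa using h)]
      simp only [pvEndVal, List.getD_cons_succ, List.drop_succ_cons]
      rw [show (i+1) + k = i + (k+1) by omega]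

lemma pvRunB_eq (cs : List String) (k : Nat) : pvRunB ((pvLowList cs).drop k) = pvRun cs k := by
  unfold pvRunB pvRun pvLowList
  rw [← List.map_drop, List.takeWhile_map]
  simp

-- mutual exclusion of the leading markers
lemma pvStarNotPlus (e : String) (h : PySem.Str.startswith e "*" = true) :
    PySem.Str.startswith e "+" = false := by
  by_contra hF
  rw [Bool.not_eq_false] at hF
  rw [PySem.Str.startswith_eq, PySem.Chars.startswith_iff] at h hF
  obtain ⟨t1, h1⟩ := h
  obtain ⟨t2, h2⟩ := hF
  rw [← h2] at h1
  simp at h1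

lemma pvFB_nil (cs : List String) (i : Nat) (h : cs.length ≤ i) (m : PySem.Dict Int Int) :
    pvFB cs i m = m := by
  unfold pvFB
  rw [List.drop_eq_nil_of_le h]
  rfl

lemma pvFB_cons (cs : List String) (i : Nat) (h : i < cs.length) (m : PySem.Dict Int Int) :
    pvFB cs i m = pvFB cs (i+1)
      (pvStepB (pvLowList cs) (pvQBefore cs) (pvStartList (pvLowList cs)) (pvEndFrom (pvLowList cs) 0)
        m ((i : Int), cs[i])) := by
  unfold pvFB
  rw [pvEnumCons cs i h, List.foldl_cons,
    show ((i:Int)+1) = ((i+1 : Nat) : Int) by push_cast; ring]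

-- B's mapping pass over one inversion run inserts the same reversed pairs as A's dict update
lemma pvChunkB (cs : List String) (s : Nat)
    (hend : s + pvRun cs s ≤ cs.length)
    (hstart : s = 0 ∨ (pvLowList cs).getD (s-1) false = false) :
    ∀ t, t ≤ pvRun cs s → ∀ m,
      pvFB cs (s + (pvRun cs s - t)) m
        = pvFB cs (s + pvRun cs s)
            ((PySem.List.pyRange ((s + (pvRun cs s - t) : Nat) : Int) ((s + pvRun cs s : Nat) : Int) 1).foldl
              (fun d k => d.insert k (((s : Nat) : Int) + ((s + pvRun cs s - 1 : Nat) : Int) - k)) m) := by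
  intro t
  induction t with
  | zero =>
    intro _ m
    rw [Nat.sub_zero, PySem.List.pyRange_one_eq_nil (le_refl _), List.foldl_nil]
  | succ t ih =>
    intro ht m
    have hjr : pvRun cs (s + (pvRun cs s - (t+1))) = t+1 := by
      rw [pvRun_inside cs (pvRun cs s - (t+1)) s (by omega)]
      omega
    obtain ⟨hj, hlj⟩ := pvRun_pos_low cs (s + (pvRun cs s - (t+1))) (by omega)
    rw [pvFB_cons cs _ hj m]
    have hlowlen : (pvLowList cs).length = cs.length := by simp [pvLowList]
    have hstval : (pvStartList (pvLowList cs)).getD (s + (pvRun cs s - (t+1))) 0 = ((s : Nat) : Int) := by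
      rw [pvStart_getD _ _ (by omega)]
      exact pvStart_run (pvLowList cs) s hstart (pvRun cs s - (t+1))
        (fun j hj1 hj2 => by
          have hrj : 0 < pvRun cs j := by
            rw [show j = s + (j - s) by omega, pvRun_inside cs (j - s) s (by omega)]
            omega
          obtain ⟨hjlt, hjl⟩ := pvRun_pos_low cs j hrj
          rw [pvLow_getD_lt cs j hjlt]
          exact hjl)
    have henval : (pvEndFrom (pvLowList cs) 0).getD (s + (pvRun cs s - (t+1))) 0
        = ((s + pvRun cs s - 1 : Nat) : Int) := by
      rw [pvEnd_getD _ 0 _ (by omega), pvEndVal,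
        if_pos (by rw [pvLow_getD_lt cs _ hj]; exact hlj), pvRunB_eq, hjr]
      congr 1
      omega
    have hstepval : pvStepB (pvLowList cs) (pvQBefore cs) (pvStartList (pvLowList cs))
          (pvEndFrom (pvLowList cs) 0) m (((s + (pvRun cs s - (t+1)) : Nat) : Int), cs[s + (pvRun cs s - (t+1))])
        = m.insert ((s + (pvRun cs s - (t+1)) : Nat) : Int)
            (((s : Nat) : Int) + ((s + pvRun cs s - 1 : Nat) : Int) - ((s + (pvRun cs s - (t+1)) : Nat) : Int)) := by
      rw [pvStepB]
      simp only [PySem.List.pyGetD_natCast]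
      rw [pvLow_getD_lt cs _ hj, hlj]
      simp only [if_true, hstval, henval]
    rw [hstepval]
    have hcons : PySem.List.pyRange ((s + (pvRun cs s - (t+1)) : Nat) : Int) ((s + pvRun cs s : Nat) : Int) 1
        = ((s + (pvRun cs s - (t+1)) : Nat) : Int)
          :: PySem.List.pyRange (((s + (pvRun cs s - (t+1)) : Nat) : Int) + 1) ((s + pvRun cs s : Nat) : Int) 1 := by
      exact PySem.List.pyRange_one_cons (by exact_mod_cast (by omega : s + (pvRun cs s - (t+1)) < s + pvRun cs s))
    rw [hcons, List.foldl_cons]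
    have hcast : (((s + (pvRun cs s - (t+1)) : Nat) : Int) + 1) = ((s + (pvRun cs s - t) : Nat) : Int) := by
      push_cast [Nat.sub_lt_iff_lt_add]
      omega
    rw [hcast]
    have := ih (by omega) (m.insert ((s + (pvRun cs s - (t+1)) : Nat) : Int)
      (((s : Nat) : Int) + ((s + pvRun cs s - 1 : Nat) : Int) - ((s + (pvRun cs s - (t+1)) : Nat) : Int)))
    rw [show s + (pvRun cs s - (t+1)) + 1 = s + (pvRun cs s - t) by omega]
    exact this

-- ---------- main equivalence induction ----------

lemma pvMain (cs : List String) (h2 : cs.getLast?.all (fun s => !pvLastLower s) = true) :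
    ∀ (K i : Nat) (m : PySem.Dict Int Int) (inv : PySem.Set Int),
      cs.length ≤ i + K →
      (∀ x ∈ inv, x < (i : Int)) →
      (pvLastLower (cs.getD i "") = true → (i = 0 ∨ pvLastLower (cs.getD (i-1) "") = false)) →
      (pvFA cs i (m, pvQ cs i, inv)).1 = pvFB cs i m := by
  intro K
  induction K with
  | zero =>
    intro i m inv hK _ _
    rw [pvFB_nil cs i (by omega), pvFA, List.drop_eq_nil_of_le (by omega : cs.length ≤ i)]
    rfl
  | succ K ih =>
    intro i m inv hK halign hrs
    by_cases hin : i < cs.length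
    · have hFA : pvFA cs i (m, pvQ cs i, inv)
          = pvFA cs (i+1) (pvStepA cs (m, pvQ cs i, inv) ((i : Int), cs[i])) := by
        rw [pvFA, pvEnumCons cs i hin, List.foldl_cons,
          show ((i : Int) + 1) = ((i+1 : Nat) : Int) by push_cast; ring]
        rfl
      have hcont : inv.contains (i : Int) = false := by
        cases hcn : inv.contains (i : Int) with
        | false => rfl
        | true =>
          have hx : ((i : Nat) : Int) ∈ inv := by
            simpa [PySem.Set.contains, List.contains_iff_mem] using hcn
          have := halign _ hx
          omega
      by_cases hl : pvLastLower cs[i] = true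
      · -- inversion run
        have hrs' : pvRun cs i = pvRun cs (i+1) + 1 := pvRun_step cs i hin hl
        have hr1 : 1 ≤ pvRun cs i := by omega
        have hlt : i + pvRun cs i < cs.length := pvRun_lt cs h2 cs.length i (by omega) hin
        obtain ⟨inv', heq, hmem⟩ := pvInnerA_eq cs h2 (cs.length + 1) i (pvQ cs i) (i : Int) inv hin hl
          (by have := pvRun_le cs i (le_of_lt hin); omega)
        have hstep : pvStepA cs (m, pvQ cs i, inv) ((i:Int), cs[i])
            = (((PySem.List.pyRange (i:Int) (((i + pvRun cs i - 1 : Nat) : Int) + 1) 1).foldl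
                  (fun m k => m.insert k (((i + pvRun cs i - 1 : Nat) : Int) - (k - (i : Int)))) m),
                pvQ cs i + (pvRun cs i : Int), inv') := by
          simp only [pvStepA, hcont, Bool.false_eq_true, if_false, hl, if_true, heq,
            pvZipRanges, List.foldl_map]
        rw [hFA, hstep]
        have hskip := pvSkip cs (i + pvRun cs i - 1) (by omega) (pvRun cs i - 1) (i + 1)
          (((PySem.List.pyRange (i : Int) (((i + pvRun cs i - 1 : Nat) : Int) + 1) 1).foldl
              (fun m k => m.insert k (((i + pvRun cs i - 1 : Nat) : Int) - (k - (i : Int)))) m),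
            pvQ cs i + (pvRun cs i : Int), inv')
          (by omega)
          (by
            intro k hk1 hk2
            have : ((k : Nat) : Int) ∈ inv' := by
              rw [hmem]
              exact Or.inr ⟨k - i, by omega, by congr 1; omega⟩
            simpa [PySem.Set.contains, List.contains_iff_mem] using this)
        rw [show i + pvRun cs i - 1 + 1 = i + pvRun cs i by omega] at hskip
        rw [hskip]
        -- rewrite A's inserted dict into B's chunk form
        have hrange : (((i + pvRun cs i - 1 : Nat) : Int) + 1) = ((i + pvRun cs i : Nat) : Int) := by
          rw [Nat.cast_sub (by omega)]
          push_cast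
          ring
        have hfun : (fun (m : PySem.Dict Int Int) (k : Int) =>
              m.insert k (((i + pvRun cs i - 1 : Nat) : Int) - (k - (i : Int))))
            = fun m k => m.insert k (((i : Nat) : Int) + ((i + pvRun cs i - 1 : Nat) : Int) - k) := by
          funext m k
          congr 1
          ring
        rw [hrange, hfun]
        have hq : pvQ cs i + (pvRun cs i : Int) = pvQ cs (i + pvRun cs i) := by
          rw [pvQ_run cs i (pvRun cs i) (le_refl _)]
        rw [hq]
        have hrsnew : pvLastLower (cs.getD (i + pvRun cs i) "") = true →
            (i + pvRun cs i = 0 ∨ pvLastLower (cs.getD (i + pvRun cs i - 1) "") = false) := by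
          intro hcontra
          exfalso
          rw [pvGetDs cs _ hlt] at hcontra
          have hz : pvRun cs (i + pvRun cs i) = 0 := by
            have := pvRun_inside cs (pvRun cs i - 1) i (by omega)
            have hone : pvRun cs (i + (pvRun cs i - 1)) = 1 := by omega
            obtain ⟨hjl, hjl2⟩ := pvRun_pos_low cs (i + (pvRun cs i - 1)) (by omega)
            have := pvRun_step cs (i + (pvRun cs i - 1)) hjl hjl2
            rw [show i + (pvRun cs i - 1) + 1 = i + pvRun cs i by omega] at this
            omega
          rw [pvRun_step cs _ hlt hcontra] at hz
          omega
        have hmain := ih (i + pvRun cs i)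
          (((PySem.List.pyRange (i : Int) ((i + pvRun cs i : Nat) : Int) 1).foldl
              (fun d k => d.insert k (((i : Nat) : Int) + ((i + pvRun cs i - 1 : Nat) : Int) - k)) m))
          inv' (by omega)
          (by
            intro x hx
            rcases (hmem x).mp hx with hx' | ⟨k, hk, rfl⟩
            · have := halign x hx'
              have hle : ((i : Nat) : Int) ≤ ((i + pvRun cs i : Nat) : Int) := by
                exact_mod_cast Nat.le_add_right i (pvRun cs i)
              omega
            · exact_mod_cast Nat.add_lt_add_left hk i)
          hrsnew
        rw [hmain]
        have hchunk := pvChunkB cs i (le_of_lt hlt)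
          (by
            rcases hrs (by rw [pvGetDs cs i hin]; exact hl) with h0 | hF
            · exact Or.inl h0
            · exact Or.inr (by rw [pvLow_getD]; exact hF))
          (pvRun cs i) (le_refl _) m
        rw [Nat.sub_self, Nat.add_zero] at hchunk
        exact hchunk.symm
      · -- non-inversion: peel one step on both sides
        rw [Bool.not_eq_true] at hl
        have hcast1 : ((i : Int) + 1) = ((i+1 : Nat) : Int) := by push_cast; ring
        have hBstep := pvFB_cons cs i hin m
        have hlowD : (pvLowList cs).getD i false = false := by
          rw [pvLow_getD_lt cs i hin, hl]
        have hrsnew : pvLastLower (cs.getD (i+1) "") = true →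
            (i + 1 = 0 ∨ pvLastLower (cs.getD (i+1-1) "") = false) := by
          intro _
          right
          rw [show i + 1 - 1 = i by omega, pvGetDs cs i hin, hl]
        have halignnew : ∀ x ∈ inv, x < ((i+1 : Nat) : Int) := by
          intro x hx
          have := halign x hx
          push_cast
          omega
        have hqB : (pvQBefore cs).getD i 0 = pvQ cs i := pvQB_getD cs i hin
        rw [hFA, hBstep]
        simp only [pvStepA, hcont, Bool.false_eq_true, if_false, hl]
        rw [pvStepB]
        simp only [PySem.List.pyGetD_natCast, hlowD, Bool.false_eq_true, if_false]
        by_cases hd : (PySem.Str.startswith cs[i] "-" || cs[i] == "N") = true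
        · have hdel : (PySem.Str.startswith cs[i] "-" || cs[i] == "N" || PySem.Str.startswith cs[i] "*") = true := by
            rw [Bool.or_eq_true]
            exact Or.inl hd
          simp only [hd, if_true, hdel]
          have hq1 : pvQ cs (i+1) = pvQ cs i := by
            rw [pvQ_succ cs i hin, hl]
            have : pvQNext 0 (cs[i], false) = 0 := by
              rw [pvQNext, if_neg (by simp), if_pos hd]
            rw [this]
            ring
          have := ih (i+1) m inv (by omega) halignnew hrsnew
          rw [hq1] at this
          exact this
        · rw [Bool.not_eq_true] at hd
          simp only [hd, Bool.false_eq_true, if_false]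
          by_cases hsub : PySem.Str.startswith cs[i] "*" = true
          · have hdel : (PySem.Str.startswith cs[i] "-" || cs[i] == "N" || PySem.Str.startswith cs[i] "*") = true := by
              rw [Bool.or_eq_true]
              exact Or.inr hsub
            simp only [hsub, if_true, hdel]
            have hq1 : pvQ cs (i+1) = pvQ cs i + 1 := by
              rw [pvQ_succ cs i hin, hl]
              congr 1
              rw [pvQNext, if_neg (by simp), if_neg (by rw [hd]; exact Bool.false_ne_true),
                if_neg (by rw [pvStarNotPlus cs[i] hsub]; exact Bool.false_ne_true)]
              norm_num
            have := ih (i+1) m inv (by omega) halignnew hrsnew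
            rw [hq1] at this
            exact this
          · rw [Bool.not_eq_true] at hsub
            have hdel : (PySem.Str.startswith cs[i] "-" || cs[i] == "N" || PySem.Str.startswith cs[i] "*") = false := by
              rw [hd, hsub]
              rfl
            simp only [hsub, Bool.false_eq_true, if_false, hdel]
            by_cases hins : PySem.Str.startswith cs[i] "+" = true
            · simp only [hins, if_true, hqB]
              have hq1 : pvQ cs (i+1) = pvQ cs i + (PySem.Str.count cs[i] "+" : Int) + 1 := by
                rw [pvQ_succ cs i hin, hl, pvQNext, if_neg (by simp),
                  if_neg (by rw [hd]; exact Bool.false_ne_true), if_pos hins]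
                ring
              have := ih (i+1) (m.insert (i : Int) (pvQ cs i + (PySem.Str.count cs[i] "+" : Int)))
                inv (by omega) halignnew hrsnew
              rw [hq1] at this
              rw [show pvQ cs i + (PySem.Str.count cs[i] "+" : Int) + 1
                  = pvQ cs i + (PySem.Str.count cs[i] "+" : Int) + 1 from rfl] at this
              exact this
            · rw [Bool.not_eq_true] at hins
              simp only [hins, Bool.false_eq_true, if_false, hqB]
              have hq1 : pvQ cs (i+1) = pvQ cs i + 1 := by
                rw [pvQ_succ cs i hin, hl, pvQNext, if_neg (by simp),
                  if_neg (by rw [hd]; exact Bool.false_ne_true), if_neg (by rw [hins]; exact Bool.false_ne_true)]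
                norm_num
              have := ih (i+1) (m.insert (i : Int) (pvQ cs i)) inv (by omega) halignnew hrsnew
              rw [hq1] at this
              exact this
    · rw [pvFB_nil cs i (by omega), pvFA, List.drop_eq_nil_of_le (by omega : cs.length ≤ i)]
      rfl

-- ===== VERDICT (by name: the statements are the Claim_ definitions above) =====
theorem calculate_index_mapping_spec : Claim_equal_calculate_index_mapping := by
  intro cs _ hPre
  unfold Spec_calculate_index_mapping calculate_index_mapping calculate_index_mapping_alt
  have hA : (PySem.List.enumerate cs 0).foldl (pvStepA cs) (PySem.Dict.empty, 0, PySem.Set.empty)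
      = pvFA cs 0 (PySem.Dict.empty, pvQ cs 0, PySem.Set.empty) := by
    rw [pvFA]
    norm_num [pvQ, pvPartial]
  have hB : (PySem.List.enumerate cs 0).foldl
        (pvStepB (pvLowList cs) (pvQBefore cs) (pvStartList (pvLowList cs)) (pvEndFrom (pvLowList cs) 0))
        PySem.Dict.empty
      = pvFB cs 0 PySem.Dict.empty := by
    rw [pvFB]
    norm_num
  rw [hA, hB]
  congr 1
  exact pvMain cs hPre.2 cs.length 0 PySem.Dict.empty PySem.Set.empty (by omega)
    (by intro x hx; simp [PySem.Set.empty] at hx)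
    (fun _ => Or.inl rfl)
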